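-- pv_equiv track=rewrite | github.com/DancingOnAir/LeetcodePythonSolution | sweep_line/2406_divide_intervals_into_minimum_number_of_groups.py | minGroups
-- ===== SOURCE A (Python) =====
-- from typing import List
--
-- def minGroups(intervals: List[List[int]]) -> int:
--     endpoints = list()
--     for s, e in intervals:
--         # 起始点，等于占据会议室，正数记录次数
--         endpoints.append([s, 1])
--         # 结束点+1，等于离开会议室，负数记录次数
--         endpoints.append([e + 1, -1])
--     res = cur = 0
--     for _, diff in sorted(endpoints):
--         cur += diff
--         res = max(res, cur)
--     return res
-- ===== SOURCE B (Python) =====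
-- from typing import List
--
-- def minGroups(intervals: List[List[int]]) -> int:
--     starts = sorted(s for s, e in intervals)
--     ends = sorted(e for s, e in intervals)
--     j = res = 0
--     for i, s in enumerate(starts):
--         while j < len(ends) and ends[j] < s:
--             j += 1
--         res = max(res, i + 1 - j)
--     return res
-- ===== Notes on version B (the rewrite author's own statement) =====
-- stated objective: alternative
-- what changed: Instead of building 2n [coordinate, delta] lists, sorting them lexicographically and sweeping a running prefix sum, B sorts the start and end coordinates separately and runs a two-pointer scan that reuses the earliest-ending group, tracking the running maximum of open groups.
-- outside the precondition, e.g. on minGroups([[1, 2, 3]]): A raises ValueError, B raises ValueError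
import Mathlib
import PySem

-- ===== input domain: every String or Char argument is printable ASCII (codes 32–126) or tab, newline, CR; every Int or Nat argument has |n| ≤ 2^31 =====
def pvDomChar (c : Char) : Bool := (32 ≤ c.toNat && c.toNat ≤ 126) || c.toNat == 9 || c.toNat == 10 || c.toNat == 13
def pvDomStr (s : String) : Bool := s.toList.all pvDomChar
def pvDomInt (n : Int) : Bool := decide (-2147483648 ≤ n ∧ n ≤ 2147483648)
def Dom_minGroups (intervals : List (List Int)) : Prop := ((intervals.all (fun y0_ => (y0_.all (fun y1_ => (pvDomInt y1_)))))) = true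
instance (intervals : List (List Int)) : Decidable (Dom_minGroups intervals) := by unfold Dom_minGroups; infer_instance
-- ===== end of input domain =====

-- B sorts starts and ends separately and runs a two-pointer scan instead of A's
-- single sweep over a lexicographically sorted ±1 event list (objective: alternative algorithm).


-- ===== PORT A =====
-- 'for s, e in intervals: endpoints.append([s, 1]); endpoints.append([e + 1, -1])'
-- (each 2-element Python list event is ported as a pair; on a row that is not a
-- 2-list Python raises ValueError — excluded by Pre_, the '_' arm is junk there)
def pvEventsOf (l : List Int) : List (Int × Int) :=
  match l with
  | [s, e] => [(s, (1 : Int)), (e + 1, (-1 : Int))]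
  | _ => []

def minGroups (intervals : List (List Int)) : Int :=
  let endpoints := intervals.foldl (fun acc l => acc ++ pvEventsOf l) []
  -- 'sorted(endpoints)': Python's lexicographic order on the 2-lists = Prod.Lex on the pairs
  let sortedE := PySem.List.sorted endpoints (fun p => toLex p) false
  -- 'res = cur = 0; for _, diff in sorted(endpoints): cur += diff; res = max(res, cur)'
  (sortedE.foldl (fun (st : Int × Int) p => (max st.1 (st.2 + p.2), st.2 + p.2)) (0, 0)).1

-- ===== PORT B =====
-- Source B: sort starts and ends separately, two-pointer j over ends, running max of i+1-j
def pvStartOf (l : List Int) : Int :=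
  match l with | [s, _] => s | _ => 0
def pvEndOf (l : List Int) : Int :=
  match l with | [_, e] => e | _ => 0

-- 'while j < len(ends) and ends[j] < s: j += 1'
def pvAdvance (ends : List Int) (s : Int) (j : Nat) : Nat :=
  if h : j < ends.length then
    if ends[j] < s then pvAdvance ends s (j + 1) else j
  else j
termination_by ends.length - j

-- 'for i, s in enumerate(starts): … ; res = max(res, i + 1 - j)'
def pvBMain (ends : List Int) : List Int → Nat → Nat → Int → Int
  | [], _, _, res => res
  | s :: rest, i, j, res =>
      let j' := pvAdvance ends s j
      pvBMain ends rest (i + 1) j' (max res ((i : Int) + 1 - (j' : Int)))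

def minGroups_alt (intervals : List (List Int)) : Int :=
  let starts := PySem.List.sorted (intervals.map pvStartOf) (fun x => x) false
  let ends := PySem.List.sorted (intervals.map pvEndOf) (fun x => x) false
  pvBMain ends starts 0 0 0

-- ===== PRECONDITION & SPEC =====
-- Pre_ excludes exactly the rows on which Python's 'for s, e in intervals' raises
-- ValueError (a row that is not a 2-element list); both A and B raise there.
def Pre_minGroups (intervals : List (List Int)) : Prop :=
  ∀ l ∈ intervals, l.length = 2
instance (intervals : List (List Int)) : Decidable (Pre_minGroups intervals) := by
  unfold Pre_minGroups; infer_instance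

def pvWitness_minGroups : List (List Int) := [[1, 3], [2, 4], [5, 5]]

def Spec_minGroups (intervals : List (List Int)) (out : Int) : Prop := out = minGroups_alt intervals
instance (intervals : List (List Int)) (out : Int) : Decidable (Spec_minGroups intervals out) := by unfold Spec_minGroups; infer_instance

-- ===== CLAIM (what is proved, stated in full; the proofs are below) =====
def Claim_equal_minGroups : Prop := ∀ (intervals : List (List Int)), Dom_minGroups intervals → Pre_minGroups intervals → Spec_minGroups intervals (minGroups intervals)

-- ===== LEMMAS AND PROOFS =====

-- merge of the two sorted streams: the end event (e+1, -1) goes first iff e < s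
def pvMerge : List Int → List Int → List (Int × Int)
  | S, [] => S.map (fun s => (s, (1 : Int)))
  | [], e :: E => (e + 1, (-1 : Int)) :: pvMerge [] E
  | s :: S, e :: E =>
      if e < s then (e + 1, (-1 : Int)) :: pvMerge (s :: S) E
      else (s, (1 : Int)) :: pvMerge S (e :: E)

-- the list-level form of B's two-pointer loop, same recursion shape as pvMerge
def pvBLoop : List Int → List Int → Int → Int → Int
  | [], _, res, _ => res
  | _ :: S, [], res, cur => pvBLoop S [] (max res (cur + 1)) (cur + 1)
  | s :: S, e :: E, res, cur =>
      if e < s then pvBLoop (s :: S) E res (cur - 1)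
      else pvBLoop S (e :: E) (max res (cur + 1)) (cur + 1)

lemma pvMerge_perm (S E : List Int) :
    (pvMerge S E).Perm (S.map (fun s => (s, (1 : Int))) ++ E.map (fun e => (e + 1, (-1 : Int)))) := by
  fun_induction pvMerge S E with
  | case1 S => simp
  | case2 e E ih => simpa using List.Perm.cons (α := Int × Int) (e + 1, -1) ih
  | case3 s S e E hlt ih =>
      simp only [List.map_cons]
      exact ((List.Perm.cons _ ih).trans List.perm_middle.symm)
  | case4 s S e E hlt ih =>
      simp only [List.map_cons, List.cons_append]
      exact List.Perm.cons _ ih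

lemma pvMerge_pairwise (S E : List Int)
    (hS : S.Pairwise (· ≤ ·)) (hE : E.Pairwise (· ≤ ·)) :
    (pvMerge S E).Pairwise (fun a b => toLex a ≤ toLex b) := by
  fun_induction pvMerge S E with
  | case1 S =>
      refine List.pairwise_map.mpr ?_
      exact hS.imp (fun h => by simp only [Prod.Lex.le_iff, ofLex_toLex]; omega)
  | case2 e E ih =>
      rw [List.pairwise_cons]
      refine ⟨?_, ih hS (List.pairwise_cons.mp hE).2⟩
      intro b hb
      have := (pvMerge_perm [] E).mem_iff.mp hb
      simp only [List.map_nil, List.nil_append, List.mem_map] at this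
      obtain ⟨e', he', rfl⟩ := this
      have := (List.pairwise_cons.mp hE).1 e' he'
      simp only [Prod.Lex.le_iff, ofLex_toLex]; omega
  | case3 s S e E hlt ih =>
      rw [List.pairwise_cons]
      refine ⟨?_, ih hS (List.pairwise_cons.mp hE).2⟩
      intro b hb
      have := (pvMerge_perm (s :: S) E).mem_iff.mp hb
      simp only [List.mem_append, List.mem_map, List.mem_cons] at this
      rcases this with ⟨s', hs', rfl⟩ | ⟨e', he', rfl⟩
      · rcases hs' with rfl | hs'
        · simp only [Prod.Lex.le_iff, ofLex_toLex]; omega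
        · have := List.rel_of_pairwise_cons hS hs'
          simp only [Prod.Lex.le_iff, ofLex_toLex]; omega
      · have := List.rel_of_pairwise_cons hE he'
        simp only [Prod.Lex.le_iff, ofLex_toLex]; omega
  | case4 s S e E hlt ih =>
      rw [List.pairwise_cons]
      refine ⟨?_, ih (List.pairwise_cons.mp hS).2 hE⟩
      intro b hb
      have := (pvMerge_perm S (e :: E)).mem_iff.mp hb
      simp only [List.mem_append, List.mem_map, List.mem_cons] at this
      rcases this with ⟨s', hs', rfl⟩ | ⟨e', he', rfl⟩
      · have := (List.pairwise_cons.mp hS).1 s' hs'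
        simp only [Prod.Lex.le_iff, ofLex_toLex]; omega
      · rcases he' with rfl | he'
        · simp only [Prod.Lex.le_iff, ofLex_toLex]; omega
        · have := List.rel_of_pairwise_cons hE he'
          simp only [Prod.Lex.le_iff, ofLex_toLex]; omega

-- A's sweep over the merged event list is B's two-pointer loop (res dominates cur,
-- so the -1 events never touch the running max)
lemma pvSweep_eq_bLoop (S E : List Int) (res cur : Int) (h : cur ≤ res) :
    ((pvMerge S E).foldl (fun (st : Int × Int) p => (max st.1 (st.2 + p.2), st.2 + p.2)) (res, cur)).1
      = pvBLoop S E res cur := by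
  fun_induction pvMerge S E generalizing res cur with
  | case1 S =>
      induction S generalizing res cur with
      | nil => simp [pvBLoop]
      | cons s S ih =>
          simp only [List.map_cons, List.foldl_cons, pvBLoop]
          exact ih _ _ (by omega)
  | case2 e E ih =>
      simp only [List.foldl_cons, pvBLoop]
      rw [show max res (cur + -1) = res by omega]
      have := ih res (cur - 1) (by omega)
      simpa [pvBLoop, show cur + -1 = cur - 1 by ring] using this
  | case3 s S e E hlt ih =>
      simp only [List.foldl_cons, pvBLoop, if_pos hlt]
      rw [show max res (cur + -1) = res by omega]
      exact ih res (cur - 1) (by omega)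
  | case4 s S e E hlt ih =>
      simp only [List.foldl_cons, pvBLoop, if_neg hlt]
      exact ih _ _ (by omega)

lemma pvAdvance_le (ends : List Int) (s : Int) (j : Nat) (h : j ≤ ends.length) :
    pvAdvance ends s j ≤ ends.length := by
  fun_induction pvAdvance ends s j with
  | case1 j h1 h2 ih => exact ih (by omega)
  | case2 j h1 h2 => omega
  | case3 j h1 => omega

-- one step of B's outer loop: the inner while (pvAdvance) is the pop phase of pvBLoop
lemma pvBLoop_step (ends S : List Int) (s : Int) (i j : Nat) (res : Int)
    (h : j ≤ ends.length) :
    pvBLoop (s :: S) (ends.drop j) res ((i : Int) - (j : Int))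
      = pvBLoop S (ends.drop (pvAdvance ends s j))
          (max res ((i : Int) + 1 - (pvAdvance ends s j : Int)))
          ((i : Int) + 1 - (pvAdvance ends s j : Int)) := by
  fun_induction pvAdvance ends s j with
  | case1 j h1 h2 ih =>
      rw [List.drop_eq_getElem_cons h1]
      simp only [pvBLoop, if_pos h2]
      rw [show (i : Int) - (j : Int) - 1 = (i : Int) - ((j : Nat) + 1 : Nat) by push_cast; ring]
      exact ih (by omega)
  | case2 j h1 h2 =>
      conv_lhs => rw [List.drop_eq_getElem_cons h1]
      simp only [pvBLoop, if_neg h2]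
      rw [List.drop_eq_getElem_cons h1]
      congr 1 <;> omega
  | case3 j h1 =>
      have hj : ends.length ≤ j := by omega
      rw [List.drop_eq_nil_of_le hj]
      simp only [pvBLoop]
      congr 1 <;> omega

lemma pvBMain_eq_bLoop (ends : List Int) (S : List Int) (i j : Nat) (res : Int)
    (h : j ≤ ends.length) :
    pvBMain ends S i j res = pvBLoop S (ends.drop j) res ((i : Int) - (j : Int)) := by
  induction S generalizing i j res with
  | nil => simp [pvBMain, pvBLoop]
  | cons s S ih =>
      rw [pvBMain, pvBLoop_step ends S s i j res h]
      rw [ih (i + 1) (pvAdvance ends s j) _ (pvAdvance_le ends s j h)]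
      congr 1

-- under Pre_, A's event list is a permutation of start events ++ end events
lemma pvEvents_perm (intervals : List (List Int)) (hPre : ∀ l ∈ intervals, l.length = 2) :
    (intervals.flatMap pvEventsOf).Perm
      ((intervals.map pvStartOf).map (fun s => (s, (1 : Int)))
        ++ (intervals.map pvEndOf).map (fun e => (e + 1, (-1 : Int)))) := by
  induction intervals with
  | nil => simp
  | cons l rest ih =>
      obtain ⟨s, e, rfl⟩ : ∃ s e, l = [s, e] := by
        have h2 := hPre l (List.mem_cons_self ..)
        match l, h2 with
        | [a, b], _ => exact ⟨a, b, rfl⟩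
      simp only [List.flatMap_cons, List.map_cons, pvEventsOf, pvStartOf, pvEndOf,
        List.cons_append]
      refine List.Perm.cons _ ?_
      exact (List.Perm.cons _ (ih (fun l hl => hPre l (List.mem_cons_of_mem _ hl)))).trans
        List.perm_middle.symm

-- ===== VERDICT (by name: the statement is the Claim_ definition above) =====
theorem minGroups_spec : Claim_equal_minGroups := by
  intro intervals _hDom hPre
  unfold Spec_minGroups minGroups minGroups_alt
  simp only [PySem.List.foldl_append_eq_flatMap, List.nil_append]
  set S := PySem.List.sorted (intervals.map pvStartOf) (fun x => x) false with hSdef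
  set E := PySem.List.sorted (intervals.map pvEndOf) (fun x => x) false with hEdef
  have hSp : S.Pairwise (· ≤ ·) := PySem.List.sorted_pairwise _ _
  have hEp : E.Pairwise (· ≤ ·) := PySem.List.sorted_pairwise _ _
  have hperm : (intervals.flatMap pvEventsOf).Perm
      (S.map (fun s => (s, (1 : Int))) ++ E.map (fun e => (e + 1, (-1 : Int)))) :=
    (pvEvents_perm intervals hPre).trans
      (((PySem.List.sorted_perm _ _ _).map _).append ((PySem.List.sorted_perm _ _ _).map _)).symm
  have hsorted_eq :
      PySem.List.sorted (intervals.flatMap pvEventsOf) (fun p => toLex p) false = pvMerge S E :=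
    PySem.List.eq_of_perm_of_pairwise_le_of_injective (fun p : Int × Int => toLex p)
      toLex.injective
      ((PySem.List.sorted_perm _ _ _).trans (hperm.trans (pvMerge_perm S E).symm))
      (PySem.List.sorted_pairwise _ _)
      (pvMerge_pairwise S E hSp hEp)
  rw [hsorted_eq, pvSweep_eq_bLoop S E 0 0 le_rfl,
    pvBMain_eq_bLoop E S 0 0 0 (Nat.zero_le _)]
  simp
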